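-- pv_equiv track=rewrite | github.com/rranaikakq-71/Shopifynew | Hello.py | is_site_dead
-- ===== SOURCE A (Python) =====
-- def is_site_dead(response_text):
--     if not response_text:
--         return True
--
--     response_lower = response_text.lower()
--
--     dead_indicators = [
--         "del ammount empty", "del amount empty", "product id is empty",
--         "tax amount is empty", "token not found", "gateway not configured",
--         "shopify domain not found", "invalid shopify url", "site not found",
--         "r4 token empty", "clinte token", "product id empty",
--         "invalid url", "py id empty" "captcha" "captcha-notsolved" "captcha_required"
--     ]
--
--     for indicator in dead_indicators:
--         if indicator in response_lower:
--             return True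
--
--     working_indicators = [
--         "incorrect_zip", "card decline", "3dcc", "ccn",
--         "incorrect card number", "card cvv", "card ccn",
--         "thank you", "payment successful", "approved", "success",
--         "incorrect_cvv", "invalid_cvv", "incorrect_cvc", "invalid_cvc",
--         "insufficient funds", "captcha_solved", "solved"
--     ]
--
--     for indicator in working_indicators:
--         if indicator in response_lower:
--             return False
--
--     return False
-- ===== SOURCE B (Python) =====
-- # Dead-site detector: a single left-to-right scan over the text, trying every
-- # dead indicator at each position (the indicator list's missing commas fixed).
--
-- DEAD_INDICATORS = (
--     "del ammount empty", "del amount empty", "product id is empty",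
--     "tax amount is empty", "token not found", "gateway not configured",
--     "shopify domain not found", "invalid shopify url", "site not found",
--     "r4 token empty", "clinte token", "product id empty",
--     "invalid url", "py id empty", "captcha", "captcha-notsolved", "captcha_required",
-- )
--
-- def is_site_dead(response_text):
--     if not response_text:
--         return True
--     low = response_text.lower()
--     for i in range(len(low)):
--         for ind in DEAD_INDICATORS:
--             if low.startswith(ind, i):
--                 return True
--     return False
-- ===== Notes on version B (the rewrite author's own statement) =====
-- stated objective: alternative
-- what changed: B inverts the traversal: one left-to-right scan over text positions trying each dead indicator at that position, instead of A's per-indicator whole-text substring scans; it drops A's unreachable working-indicators pass (both of its outcomes are False) and fixes the missing commas that fused A's last four dead indicators into one string.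
-- intended difference: On nonempty texts whose lowercase form contains 'py id empty' or 'captcha' yet none of A's dead indicators (missing commas concatenated its last four indicators into one 51-char string it cannot match there), A returns False while B returns True, the evidently intended classification. — e.g. on is_site_dead("captcha"): A returns false, B returns true
import Mathlib
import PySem

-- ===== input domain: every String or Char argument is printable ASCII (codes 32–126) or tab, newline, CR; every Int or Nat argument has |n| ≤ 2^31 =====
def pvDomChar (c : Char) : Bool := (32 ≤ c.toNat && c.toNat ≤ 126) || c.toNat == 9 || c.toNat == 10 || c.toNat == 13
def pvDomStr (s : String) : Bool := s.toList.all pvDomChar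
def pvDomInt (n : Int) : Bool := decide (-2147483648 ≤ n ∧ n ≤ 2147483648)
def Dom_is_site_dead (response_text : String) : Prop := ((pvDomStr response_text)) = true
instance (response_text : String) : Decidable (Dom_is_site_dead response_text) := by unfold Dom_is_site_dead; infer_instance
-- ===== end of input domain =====

-- B scans the text once, trying each dead indicator at every position, with the indicator
-- list's missing commas fixed (intended difference D_ below) and the unreachable
-- working-indicators pass dropped; return value equal to A outside D_.

-- ===== PORT A =====
-- A's two local list literals, hoisted unchanged to module constants
def dead_indicators : List String :=
  ["del ammount empty", "del amount empty", "product id is empty",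
   "tax amount is empty", "token not found", "gateway not configured",
   "shopify domain not found", "invalid shopify url", "site not found",
   "r4 token empty", "clinte token", "product id empty",
   "invalid url", "py id emptycaptchacaptcha-notsolvedcaptcha_required"]
def working_indicators : List String :=
  ["incorrect_zip", "card decline", "3dcc", "ccn",
   "incorrect card number", "card cvv", "card ccn",
   "thank you", "payment successful", "approved", "success",
   "incorrect_cvv", "invalid_cvv", "incorrect_cvc", "invalid_cvc",
   "insufficient funds", "captcha_solved", "solved"]

def is_site_dead (response_text : String) : Bool :=
  if response_text = "" then true
  else
    let response_lower := PySem.Str.lower response_text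
    -- each 'for … if … return' loop = any
    if dead_indicators.any (fun ind => PySem.Str.isIn ind response_lower) then true
    else
      if working_indicators.any (fun ind => PySem.Str.isIn ind response_lower) then false
      else false

-- ===== PORT B =====
def DEAD_INDICATORS : List String :=
  ["del ammount empty", "del amount empty", "product id is empty",
   "tax amount is empty", "token not found", "gateway not configured",
   "shopify domain not found", "invalid shopify url", "site not found",
   "r4 token empty", "clinte token", "product id empty",
   "invalid url", "py id empty", "captcha", "captcha-notsolved", "captcha_required"]

-- low.startswith(ind, i) with 0 ≤ i ported as: ind.toList is a prefix of low.toList.drop i (exact for i ≥ 0)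
def is_site_dead_alt (response_text : String) : Bool :=
  if response_text = "" then true
  else
    let low := (PySem.Str.lower response_text).toList
    (List.range low.length).any (fun i =>
      DEAD_INDICATORS.any (fun ind => PySem.Chars.startswith (low.drop i) ind.toList))

-- ===== PRECONDITION & SPEC =====
-- On nonempty texts whose lowercase form contains "py id empty" or "captcha" yet none of
-- A's dead_indicators, A returns false — missing commas accidentally concatenated its last
-- four dead indicators into one 51-char string it cannot match — while B returns true there,
-- the evidently intended classification.
def D_is_site_dead (response_text : String) : Prop :=
  response_text ≠ "" ∧
  (PySem.Str.isIn "py id empty" (PySem.Str.lower response_text) = true ∨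
   PySem.Str.isIn "captcha" (PySem.Str.lower response_text) = true) ∧
  (∀ ind ∈ dead_indicators, PySem.Str.isIn ind (PySem.Str.lower response_text) = false)
instance (response_text : String) : Decidable (D_is_site_dead response_text) := by
  unfold D_is_site_dead; infer_instance

def Spec_is_site_dead (response_text : String) (out : Bool) : Prop :=
  ¬ D_is_site_dead response_text → out = is_site_dead_alt response_text
instance (response_text : String) (out : Bool) : Decidable (Spec_is_site_dead response_text out) := by
  unfold Spec_is_site_dead; infer_instance

def pvDiffWitness_is_site_dead : String := "captcha"
def pvDiffWitnessOut_is_site_dead : Bool × Bool := (false, true)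

-- ===== CLAIM (what is proved, stated in full; the proofs are below) =====
def Claim_unchanged_is_site_dead : Prop := ∀ (response_text : String), Dom_is_site_dead response_text → Spec_is_site_dead response_text (is_site_dead response_text)
def Claim_changed_is_site_dead : Prop := Dom_is_site_dead (pvDiffWitness_is_site_dead) ∧ D_is_site_dead (pvDiffWitness_is_site_dead) ∧ is_site_dead (pvDiffWitness_is_site_dead) = pvDiffWitnessOut_is_site_dead.1 ∧ is_site_dead_alt (pvDiffWitness_is_site_dead) = pvDiffWitnessOut_is_site_dead.2 ∧ pvDiffWitnessOut_is_site_dead.1 ≠ pvDiffWitnessOut_is_site_dead.2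
def Claim_exact_is_site_dead : Prop := ∀ (response_text : String), Dom_is_site_dead response_text → D_is_site_dead response_text → is_site_dead response_text ≠ is_site_dead_alt response_text

-- ===== LEMMAS AND PROOFS =====

-- the 13 dead indicators the two lists share (dead_indicators = C13 ++ [fused run], DEAD_INDICATORS = C13 ++ the four)
def C13 : List String :=
  ["del ammount empty", "del amount empty", "product id is empty",
   "tax amount is empty", "token not found", "gateway not configured",
   "shopify domain not found", "invalid shopify url", "site not found",
   "r4 token empty", "clinte token", "product id empty", "invalid url"]

-- a nonempty pattern is a substring iff it is a prefix at some position < length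
theorem isIn_eq_range_any (l : List Char) (D : List String)
    (hne : ∀ ind ∈ D, ind.toList ≠ []) :
    (List.range l.length).any (fun i => D.any (fun ind => PySem.Chars.startswith (l.drop i) ind.toList))
      = D.any (fun ind => PySem.Chars.isIn ind.toList l) := by
  apply Bool.eq_iff_iff.mpr
  simp only [List.any_eq_true, List.mem_range, PySem.Chars.startswith_iff]
  constructor
  · rintro ⟨i, _, ind, hind, hpre⟩
    exact ⟨ind, hind, (PySem.Chars.exists_prefix_drop_iff_isIn _ _).mp ⟨i, hpre⟩⟩
  · rintro ⟨ind, hind, hIn⟩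
    obtain ⟨j, hpre⟩ := (PySem.Chars.exists_prefix_drop_iff_isIn ind.toList l).mpr hIn
    refine ⟨j, ?_, ind, hind, hpre⟩
    by_contra h
    push Not at h
    rw [List.drop_eq_nil_of_le h] at hpre
    exact hne ind hind (List.prefix_nil.mp hpre)

theorem isIn_sub_trans (a b s : String)
    (h : PySem.Chars.isIn a.toList b.toList = true)
    (hb : PySem.Str.isIn b s = true) : PySem.Str.isIn a s = true := by
  rw [PySem.Str.isIn_iff_infix] at *
  exact ((PySem.Chars.isIn_iff_infix _ _).mp h).trans hb

theorem B_eval (s : String) (hs : ¬ s = "") :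
    is_site_dead_alt s = DEAD_INDICATORS.any (fun ind => PySem.Str.isIn ind (PySem.Str.lower s)) := by
  unfold is_site_dead_alt
  rw [if_neg hs, isIn_eq_range_any _ _ (by decide)]
  simp [PySem.Str.isIn]

theorem A_eval (s : String) (hs : ¬ s = "") :
    is_site_dead s = dead_indicators.any (fun ind => PySem.Str.isIn ind (PySem.Str.lower s)) := by
  unfold is_site_dead
  rw [if_neg hs]
  cases h : dead_indicators.any (fun ind => PySem.Str.isIn ind (PySem.Str.lower s)) <;>
    simp_all

theorem any_lists_eq (In : String → Bool)
    (hf : In "py id emptycaptchacaptcha-notsolvedcaptcha_required" = true → In "captcha" = true)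
    (hcns : In "captcha-notsolved" = true → In "captcha" = true)
    (hcr : In "captcha_required" = true → In "captcha" = true)
    (hD : (∀ ind ∈ dead_indicators, In ind = false) →
          In "py id empty" = false ∧ In "captcha" = false) :
    dead_indicators.any In = DEAD_INDICATORS.any In := by
  rw [show dead_indicators = C13 ++ ["py id emptycaptchacaptcha-notsolvedcaptcha_required"] from rfl,
      show DEAD_INDICATORS = C13 ++ ["py id empty", "captcha", "captcha-notsolved", "captcha_required"] from rfl,
      List.any_append, List.any_append]
  by_cases hc : C13.any In = true
  · simp [hc]
  · have hc' : C13.any In = false := by simpa using hc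
    cases hfv : In "py id emptycaptchacaptcha-notsolvedcaptcha_required" with
    | true => simp [hc', hfv, hf hfv]
    | false =>
      obtain ⟨hpy, hcap⟩ := hD (by
        intro ind hmem
        rw [show dead_indicators = C13 ++ ["py id emptycaptchacaptcha-notsolvedcaptcha_required"] from rfl] at hmem
        rcases List.mem_append.mp hmem with h | h
        · have := List.any_eq_false.mp hc' ind h
          simpa using this
        · simp only [List.mem_singleton] at h
          rw [h]; exact hfv)
      have h1 : In "captcha-notsolved" = false := by
        cases h2 : In "captcha-notsolved" with
        | false => rfl
        | true => exact absurd (hcns h2) (by simp [hcap])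
      have h2 : In "captcha_required" = false := by
        cases h3 : In "captcha_required" with
        | false => rfl
        | true => exact absurd (hcr h3) (by simp [hcap])
      simp [hc', hfv, hpy, hcap, h1, h2]

-- ===== VERDICT (by name: the statements are the Claim_ definitions above) =====
theorem is_site_dead_spec : Claim_unchanged_is_site_dead := by
  intro s _
  unfold Spec_is_site_dead
  intro hnD
  by_cases hs : s = ""
  · simp [is_site_dead, is_site_dead_alt, hs]
  · rw [A_eval s hs, B_eval s hs]
    apply any_lists_eq
    · intro h; exact isIn_sub_trans _ _ _ (by decide) h
    · intro h; exact isIn_sub_trans _ _ _ (by decide) h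
    · intro h; exact isIn_sub_trans _ _ _ (by decide) h
    · intro hall
      have hor : ¬ (PySem.Str.isIn "py id empty" (PySem.Str.lower s) = true ∨
                    PySem.Str.isIn "captcha" (PySem.Str.lower s) = true) := by
        intro hor
        exact hnD ⟨hs, hor, hall⟩
      push Not at hor
      exact ⟨by simpa using hor.1, by simpa using hor.2⟩

theorem is_site_dead_changed : Claim_changed_is_site_dead := by
  unfold Claim_changed_is_site_dead; decide

theorem is_site_dead_tight : Claim_exact_is_site_dead := by
  intro s _ hD
  obtain ⟨hs, hor, hall⟩ := hD
  rw [A_eval s hs, B_eval s hs]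
  have hA : dead_indicators.any (fun ind => PySem.Str.isIn ind (PySem.Str.lower s)) = false :=
    List.any_eq_false.mpr (fun ind h => by simp only [hall ind h]; exact Bool.false_ne_true)
  have hB : DEAD_INDICATORS.any (fun ind => PySem.Str.isIn ind (PySem.Str.lower s)) = true := by
    rcases hor with h | h
    · exact List.any_eq_true.mpr ⟨"py id empty", by simp [DEAD_INDICATORS], h⟩
    · exact List.any_eq_true.mpr ⟨"captcha", by simp [DEAD_INDICATORS], h⟩
  rw [hA, hB]
  exact Bool.false_ne_true
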